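-- pv_equiv track=rewrite | github.com/mcook03/Silicore | engine/services/analysis_service.py | _summarize_primary_category
-- ===== SOURCE A (Python) =====
-- def _category_label(category):
--     return str(category).replace("_", " ").strip()
--
-- def _summarize_primary_category(risks):
--     if not risks:
--         return None
--
--     category_counts = {}
--     for risk in risks:
--         category = str(risk.get("category", "unknown"))
--         category_counts[category] = category_counts.get(category, 0) + 1
--
--     if not category_counts:
--         return None
--
--     top_category = max(category_counts.items(), key=lambda item: item[1])[0]
--     return _category_label(top_category)
-- ===== SOURCE B (Python) =====
-- def _category_label(category):
--     return str(category).replace("_", " ").strip()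
--
-- def _summarize_primary_category(risks):
--     if not risks:
--         return None
--     cats = [str(r.get("category", "unknown")) for r in risks]
--     seen = set()
--     best_cat = None
--     best_n = 0
--     for c in cats:
--         if c in seen:
--             continue
--         seen.add(c)
--         n = cats.count(c)
--         if n > best_n:
--             best_cat, best_n = c, n
--     return _category_label(best_cat)
-- ===== Notes on version B (the rewrite author's own statement) =====
-- stated objective: alternative
-- what changed: B drops the counting dict and the max-by-count scan entirely: one pass over the extracted category list skips already-seen categories (a set), counts each first-seen category with list.count, and keeps a running strict maximum, which reproduces max's first-inserted tie-breaking.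
import Mathlib
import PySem

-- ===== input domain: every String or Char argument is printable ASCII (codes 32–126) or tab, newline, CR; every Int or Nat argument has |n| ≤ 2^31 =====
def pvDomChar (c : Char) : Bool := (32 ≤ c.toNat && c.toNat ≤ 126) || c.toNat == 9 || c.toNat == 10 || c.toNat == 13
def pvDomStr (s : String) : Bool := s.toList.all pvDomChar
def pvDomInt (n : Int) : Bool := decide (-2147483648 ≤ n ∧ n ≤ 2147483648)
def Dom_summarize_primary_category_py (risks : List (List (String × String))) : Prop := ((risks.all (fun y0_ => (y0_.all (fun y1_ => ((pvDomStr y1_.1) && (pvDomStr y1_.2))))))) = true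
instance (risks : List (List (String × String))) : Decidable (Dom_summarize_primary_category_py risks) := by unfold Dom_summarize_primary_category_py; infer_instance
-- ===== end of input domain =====

-- B replaces A's dict-counting pass followed by a max-by-count scan with a dict-free
-- single loop that counts each first-seen category via list.count and keeps a running
-- strict maximum (objective: alternative, not faster).

-- ===== PORT A =====
def category_label (category : String) : String :=
  PySem.Str.strip (PySem.Str.replace category "_" " ")

def summarize_primary_category_py (risks : List (List (String × String))) : Option String :=
  if risks = [] then none
  else
    let category_counts : PySem.Dict String Int :=
      risks.foldl (fun d risk =>
        let category := (PySem.Dict.mk risk).getD "category" "unknown"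
        d.insert category (d.getD category 0 + 1)) PySem.Dict.empty
    if category_counts.items = [] then none
    else
      -- items is nonempty here, so max? is `some` (Python's max would raise on empty)
      (PySem.List.max? category_counts.items (fun item => item.2)).map
        (fun top => category_label top.1)

-- ===== PORT B =====
def summarize_primary_category_py_alt (risks : List (List (String × String))) : Option String :=
  if risks = [] then none
  else
    let cats := risks.map (fun r => (PySem.Dict.mk r).getD "category" "unknown")
    let st := cats.foldl
      (fun (st : PySem.Set String × Option String × Int) c =>
        if PySem.Set.contains st.1 c then st
        else
          let n : Int := (PySem.List.count cats c : Int)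
          if st.2.2 < n then (PySem.Set.add st.1 c, some c, n)
          else (PySem.Set.add st.1 c, st.2.1, st.2.2))
      (PySem.Set.empty, none, 0)
    -- best_cat is `some` here since cats is nonempty (risks ≠ [])
    st.2.1.map (fun c => category_label c)

-- ===== PRECONDITION & SPEC =====
def Spec_summarize_primary_category_py (risks : List (List (String × String))) (out : Option String) : Prop := out = summarize_primary_category_py_alt risks
instance (risks : List (List (String × String))) (out : Option String) : Decidable (Spec_summarize_primary_category_py risks out) := by unfold Spec_summarize_primary_category_py; infer_instance

-- ===== CLAIM (what is proved, stated in full; the proofs are below) =====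
def Claim_equal_summarize_primary_category_py : Prop := ∀ (risks : List (List (String × String))), Dom_summarize_primary_category_py risks → Spec_summarize_primary_category_py risks (summarize_primary_category_py risks)

-- ===== LEMMAS AND PROOFS =====

-- first occurrences of `l` not already in `seen`, in order
def pvDed (seen : PySem.Set String) : List String → List String
  | [] => []
  | c :: l => if PySem.Set.contains seen c then pvDed seen l
              else c :: pvDed (PySem.Set.add seen c) l

theorem pvUpdate_eq_append (l : List String) : ∀ seen : PySem.Set String,
    PySem.Set.update seen l = seen ++ pvDed seen l := by
  induction l with
  | nil => intro seen; simp [PySem.Set.update, pvDed]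
  | cons c l ih =>
    intro seen
    simp only [PySem.Set.update, List.foldl_cons, pvDed]
    by_cases h : PySem.Set.contains seen c
    · rw [if_pos h]
      have hm : c ∈ seen := (PySem.Set.contains_iff _ _).mp h
      have : PySem.Set.add seen c = seen := by simp [PySem.Set.add, hm]
      rw [this]
      exact ih seen
    · rw [if_neg h]
      have hm : c ∉ seen := fun m => h ((PySem.Set.contains_iff _ _).mpr m)
      have hadd : PySem.Set.add seen c = seen ++ [c] := by simp [PySem.Set.add, hm]
      calc List.foldl PySem.Set.add (PySem.Set.add seen c) l
          = PySem.Set.update (PySem.Set.add seen c) l := rfl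
        _ = PySem.Set.add seen c ++ pvDed (PySem.Set.add seen c) l := ih _
        _ = seen ++ (c :: pvDed (PySem.Set.add seen c) l) := by rw [hadd]; simp

theorem pvOfList_eq_ded (l : List String) :
    PySem.Set.ofList l = pvDed [] l := by
  have := pvUpdate_eq_append l []
  simpa [PySem.Set.ofList_eq_foldl, PySem.Set.update] using this

-- B's loop over the raw list equals the strict-max fold over the deduplicated list
theorem pvLoop_eq (cnt : String → Int) (l : List String) :
    ∀ (seen : PySem.Set String) (b : Option String × Int),
    l.foldl (fun st c =>
        if PySem.Set.contains st.1 c then st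
        else if st.2.2 < cnt c then (PySem.Set.add st.1 c, some c, cnt c)
        else (PySem.Set.add st.1 c, st.2.1, st.2.2)) (seen, b)
      = (PySem.Set.update seen l,
         (pvDed seen l).foldl (fun b c => if b.2 < cnt c then (some c, cnt c) else b) b) := by
  induction l with
  | nil => intro seen b; simp [PySem.Set.update, pvDed]
  | cons c l ih =>
    intro seen b
    simp only [List.foldl_cons, pvDed]
    by_cases h : PySem.Set.contains seen c
    · rw [if_pos h, if_pos h]
      have hm : c ∈ seen := (PySem.Set.contains_iff _ _).mp h
      have hadd : PySem.Set.add seen c = seen := by simp [PySem.Set.add, hm]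
      have hupd : PySem.Set.update seen (c :: l) = PySem.Set.update seen l := by
        simp [PySem.Set.update, hadd]
      rw [hupd]; exact ih seen b
    · rw [if_neg h, if_neg h]
      have hupd : PySem.Set.update seen (c :: l) = PySem.Set.update (PySem.Set.add seen c) l := by
        simp [PySem.Set.update]
      rw [hupd]
      by_cases h2 : b.2 < cnt c
      · rw [if_pos h2]
        simp only [List.foldl_cons]
        rw [if_pos h2]
        exact ih _ _
      · rw [if_neg h2]
        simp only [List.foldl_cons]
        rw [if_neg h2]
        rw [show ((PySem.Set.add seen c, b.1, b.2) : PySem.Set String × Option String × Int)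
              = (PySem.Set.add seen c, b) from by simp]
        exact ih _ b

-- a max? fold started from `some` never sees `none` again and is the plain pair fold
theorem pvMaxFold_some (cnt : String → Int) (l : List String) :
    ∀ q : String × Int,
    l.foldl (fun acc k =>
        match acc with
        | none => some (k, cnt k)
        | some m => if m.2 < cnt k then some (k, cnt k) else some m) (some q)
      = some (l.foldl (fun acc k => if acc.2 < cnt k then (k, cnt k) else acc) q) := by
  induction l with
  | nil => intro q; rfl
  | cons c l ih =>
    intro q
    simp only [List.foldl_cons]
    by_cases h : q.2 < cnt c
    · simp only [if_pos h]; exact ih (c, cnt c)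
    · simp only [if_neg h]; exact ih q

-- the Option-valued strict-max loop equals the pair fold once the accumulator is `some`
theorem pvBestFold_some (cnt : String → Int) (l : List String) :
    ∀ q : String × Int,
    l.foldl (fun b c => if b.2 < cnt c then (some c, cnt c) else b) (some q.1, q.2)
      = (fun p => (some p.1, p.2)) (l.foldl (fun acc k => if acc.2 < cnt k then (k, cnt k) else acc) q) := by
  induction l with
  | nil => intro q; rfl
  | cons c l ih =>
    intro q
    simp only [List.foldl_cons]
    by_cases h : q.2 < cnt c
    · simp only [if_pos h]; exact ih (c, cnt c)
    · simp only [if_neg h]; exact ih q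

theorem pvMax?_map (cnt : String → Int) (l : List String) :
    PySem.List.max? (l.map (fun k => (k, cnt k))) (fun item => item.2)
      = l.foldl (fun acc k =>
          match acc with
          | none => some (k, cnt k)
          | some m => if m.2 < cnt k then some (k, cnt k) else some m) none := by
  simp only [PySem.List.max?, List.foldl_map]
  apply PySem.List.foldl_congr_mem
  intro acc k _
  cases acc <;> rfl

-- A's counting fold over risks is the plain counting fold over the category list
theorem pvFoldA (rs : List (List (String × String))) : ∀ d : PySem.Dict String Int,
    List.foldl (fun d risk =>
      d.insert ((PySem.Dict.mk risk).getD "category" "unknown")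
        (d.getD ((PySem.Dict.mk risk).getD "category" "unknown") 0 + 1)) d rs
    = List.foldl (fun d c => d.insert c (d.getD c 0 + 1)) d
        (rs.map (fun r => (PySem.Dict.mk r).getD "category" "unknown")) := by
  induction rs with
  | nil => intro d; rfl
  | cons r rs ih => intro d; simp only [List.map_cons, List.foldl_cons]; exact ih _

-- the core equivalence, over the extracted category list
theorem pvMain (cats : List String) (h : cats ≠ []) :
    (if List.map (fun k => (k, (↑(List.count k cats) : Int))) (PySem.Set.ofList cats) = [] then none
     else (PySem.List.max?
            (List.map (fun k => (k, (↑(List.count k cats) : Int))) (PySem.Set.ofList cats))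
            (fun item => item.2)).map (fun top => category_label top.1))
    = ((List.foldl (fun (st : PySem.Set String × Option String × Int) c =>
          if PySem.Set.contains st.1 c then st
          else if st.2.2 < (PySem.List.count cats c : Int)
            then (PySem.Set.add st.1 c, some c, (PySem.List.count cats c : Int))
            else (PySem.Set.add st.1 c, st.2.1, st.2.2))
        (PySem.Set.empty, none, 0) cats).2.1).map (fun c => category_label c) := by
  obtain ⟨c0, t0, hc⟩ := List.exists_cons_of_ne_nil h
  have hded : PySem.Set.ofList cats = c0 :: pvDed (PySem.Set.add [] c0) t0 := by
    rw [pvOfList_eq_ded, hc, pvDed, if_neg (by simp [PySem.Set.contains])]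
  have hne : List.map (fun k => (k, (↑(List.count k cats) : Int))) (PySem.Set.ofList cats) ≠ [] := by
    rw [hded]; simp
  rw [if_neg hne]
  rw [pvLoop_eq (fun c => (PySem.List.count cats c : Int)) cats PySem.Set.empty (none, 0)]
  have hdedE : pvDed PySem.Set.empty cats = c0 :: pvDed (PySem.Set.add [] c0) t0 := by
    rw [hc]
    show (if PySem.Set.contains PySem.Set.empty c0 then pvDed PySem.Set.empty t0
          else c0 :: pvDed (PySem.Set.add PySem.Set.empty c0) t0)
        = c0 :: pvDed (PySem.Set.add [] c0) t0
    rw [if_neg (by simp [PySem.Set.contains])]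
    rfl
  have hcfun : (fun k => (k, (↑(List.count k cats) : Int)))
      = (fun k => (k, (PySem.List.count cats k : Int))) := by
    funext k; simp [PySem.List.count_eq]
  have hpos : (0 : Int) < (PySem.List.count cats c0 : Int) := by
    have hm : c0 ∈ cats := by rw [hc]; exact List.mem_cons_self ..
    simp only [PySem.List.count_eq]
    exact_mod_cast List.count_pos_iff.mpr hm
  rw [hdedE, hded, hcfun]
  simp only [List.foldl_cons]
  rw [if_pos (by simpa using hpos)]
  rw [pvBestFold_some (fun c => (PySem.List.count cats c : Int))
        (pvDed (PySem.Set.add [] c0) t0) (c0, (PySem.List.count cats c0 : Int))]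
  rw [show (c0 :: pvDed (PySem.Set.add [] c0) t0).map
        (fun k => (k, (PySem.List.count cats k : Int)))
      = (c0 :: pvDed (PySem.Set.add [] c0) t0).map
        (fun k => (k, (fun c => (PySem.List.count cats c : Int)) k)) from rfl]
  rw [pvMax?_map (fun c => (PySem.List.count cats c : Int)) (c0 :: pvDed (PySem.Set.add [] c0) t0)]
  simp only [List.foldl_cons]
  rw [pvMaxFold_some (fun c => (PySem.List.count cats c : Int))
        (pvDed (PySem.Set.add [] c0) t0) (c0, (PySem.List.count cats c0 : Int))]
  rfl

-- ===== VERDICT (by name: the statement is the Claim_ definition above) =====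
theorem summarize_primary_category_py_spec : Claim_equal_summarize_primary_category_py := by
  intro risks _
  unfold Spec_summarize_primary_category_py
  unfold summarize_primary_category_py summarize_primary_category_py_alt
  by_cases hnil : risks = []
  · simp [hnil]
  · rw [if_neg hnil, if_neg hnil]
    have hcounter : List.foldl (fun d risk =>
        d.insert ((PySem.Dict.mk risk).getD "category" "unknown")
          (d.getD ((PySem.Dict.mk risk).getD "category" "unknown") 0 + 1))
        PySem.Dict.empty risks
        = PySem.Dict.counter (risks.map (fun r => (PySem.Dict.mk r).getD "category" "unknown")) :=
      (pvFoldA risks PySem.Dict.empty).trans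
        (PySem.Dict.foldl_insert_getD_add_one_eq_counter _)
    simp only [hcounter, PySem.Dict.items_counter]
    exact pvMain (risks.map (fun r => (PySem.Dict.mk r).getD "category" "unknown"))
      (by simp [hnil])
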